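-- pv_equiv track=rewrite | github.com/qn06142/coding-python | csphn_hsg2023_dnt.py | min_inversions
-- ===== SOURCE A (Python) =====
-- from itertools import combinations
--
-- def count_inversions(A):
--     return sum(1 for i in range(len(A)) for j in range(i+1, len(A)) if A[i] > A[j])
--
-- def min_inversions(A, k, n):
--     min_inv = float('inf')
--
--     # Generate all possible sequences after k operations
--     for comb in combinations(range(n), k):
--         B = A.copy()
--         for i in comb:
--             B[i] = 1 - B[i]  # flip the bit
--         inv = count_inversions(B)
--         min_inv = min(min_inv, inv)
--
--     return min_inv
-- ===== SOURCE B (Python) =====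
-- def min_inversions(A, k, n):
--     # Recursive choose/skip over the first n positions (flip branch first, matching
--     # lexicographic order of index combinations), counting inversions with a single
--     # prefix-scan instead of a nested index comprehension.
--     def inv_count(B):
--         total, seen = 0, []
--         for x in B:
--             total += sum(1 for y in seen if y > x)
--             seen.append(x)
--         return total
--
--     tail = A[n:]
--
--     def best(done, todo, rem):
--         if rem == 0:
--             return inv_count(done + todo + tail)
--         if rem > len(todo):
--             return float('inf')
--         first, rest = todo[0], todo[1:]
--         return min(best(done + [1 - first], rest, rem - 1),
--                    best(done + [first], rest, rem))
--
--     return best([], A[:n], k)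
-- ===== Notes on version B (the rewrite author's own statement) =====
-- stated objective: alternative
-- what changed: Replace itertools.combinations over index tuples plus copy-and-flip-by-index and a nested range(i,j) comprehension by a structural choose/skip recursion on the list prefix that builds each candidate directly and counts inversions with a single prefix scan.
-- outside the precondition, e.g. on min_inversions([0, 1], 3, 2): A returns inf, B returns inf; on min_inversions([1, 0], 1, -1): A returns inf, B returns 0
import Mathlib
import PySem

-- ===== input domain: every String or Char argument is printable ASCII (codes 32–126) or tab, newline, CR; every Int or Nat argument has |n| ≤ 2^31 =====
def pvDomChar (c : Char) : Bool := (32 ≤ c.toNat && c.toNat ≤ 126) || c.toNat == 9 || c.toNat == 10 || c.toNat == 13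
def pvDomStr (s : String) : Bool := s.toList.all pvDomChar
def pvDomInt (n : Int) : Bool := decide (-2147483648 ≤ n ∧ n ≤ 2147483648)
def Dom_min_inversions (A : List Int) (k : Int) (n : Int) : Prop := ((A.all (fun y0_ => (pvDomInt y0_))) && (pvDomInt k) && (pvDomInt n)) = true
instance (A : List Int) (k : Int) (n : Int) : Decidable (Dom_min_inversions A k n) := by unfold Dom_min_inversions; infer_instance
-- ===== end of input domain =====

-- B replaces the combinations-of-indices enumeration and nested-range inversion count of A
-- by a structural choose/skip recursion with a prefix-scan inversion count (objective: alternative).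

-- ===== PORT A =====

-- sum(1 for i in range(len(A)) for j in range(i+1, len(A)) if A[i] > A[j])
def count_inversions (A : List Int) : Int :=
  ((List.range A.length).map (fun i =>
    ((((List.range' (i+1) (A.length - (i+1))).filter
        (fun j => A.getD i 0 > A.getD j 0)).length : Nat) : Int))).sum

-- itertools.combinations(xs, k), tuples in the order itertools emits them
def pyCombs (xs : List Int) (k : Nat) : List (List Int) :=
  match k, xs with
  | 0, _ => [[]]
  | _+1, [] => []
  | k+1, x :: rest => (pyCombs rest k).map (fun c => x :: c) ++ pyCombs rest (k+1)

-- B[i] = 1 - B[i]  (indices produced by range(n) are nonnegative)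
def flipAt (B : List Int) (i : Int) : List Int := B.set i.toNat (1 - B.getD i.toNat 0)

def flipAll (B : List Int) (comb : List Int) : List Int := comb.foldl flipAt B

-- min_inv = float('inf'); min_inv = min(min_inv, inv)  — none models inf
def pyMinStep (acc : Option Int) (v : Int) : Option Int :=
  match acc with
  | none => some v
  | some m => some (min m v)

def min_inversions (A : List Int) (k : Int) (n : Int) : Int :=
  ((pyCombs (PySem.List.pyRange 0 n 1) k.toNat).foldl
      (fun acc comb => pyMinStep acc (count_inversions (flipAll A comb))) none).getD 0

-- ===== PORT B =====

-- inv_count: single prefix scan, counting earlier elements greater than each new one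
def invScan (seen : List Int) (total : Int) : List Int → Int
  | [] => total
  | x :: xs => invScan (seen ++ [x]) (total + ((seen.filter (fun y => y > x)).length : Int)) xs

def inv_count (B : List Int) : Int := invScan [] 0 B

-- min with float('inf') modelled by none
def oMin (a b : Option Int) : Option Int :=
  match a, b with
  | none, b => b
  | a, none => a
  | some x, some y => some (min x y)

-- best(done, todo, rem): flip branch first, then skip branch
def best (tail : List Int) (done : List Int) (todo : List Int) (rem : Int) : Option Int :=
  if rem = 0 then some (inv_count (done ++ todo ++ tail))
  else if (todo.length : Int) < rem then none
  else
    match todo with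
    | [] => none   -- unreachable from Source B's domain (rem < 0 there raises; outside Pre_)
    | first :: rest =>
        oMin (best tail (done ++ [1 - first]) rest (rem - 1))
             (best tail (done ++ [first]) rest rem)

def min_inversions_alt (A : List Int) (k : Int) (n : Int) : Int :=
  (best (PySem.List.slice A (some n) none) [] (PySem.List.slice A none (some n)) k).getD 0

-- ===== PRECONDITION & SPEC =====
-- Pre_ excludes: k < 0 (A raises ValueError); 0 < k with n > len(A) (A raises IndexError
-- while flipping); and 0 ≤ n < k (combinations is empty, A returns float('inf'), not an int).
def Pre_min_inversions (A : List Int) (k : Int) (n : Int) : Prop :=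
  0 ≤ k ∧ (k = 0 ∨ (k ≤ n ∧ n ≤ (A.length : Int)))
instance (A : List Int) (k : Int) (n : Int) : Decidable (Pre_min_inversions A k n) := by
  unfold Pre_min_inversions; infer_instance

def pvWitness_min_inversions : List Int × Int × Int := ([1, 0, 1, 0], 2, 3)

def Spec_min_inversions (A : List Int) (k : Int) (n : Int) (out : Int) : Prop := out = min_inversions_alt A k n
instance (A : List Int) (k : Int) (n : Int) (out : Int) : Decidable (Spec_min_inversions A k n out) := by unfold Spec_min_inversions; infer_instance

-- ===== CLAIM (what is proved, stated in full; the proofs are below) =====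
def Claim_equal_min_inversions : Prop := ∀ (A : List Int) (k : Int) (n : Int), Dom_min_inversions A k n → Pre_min_inversions A k n → Spec_min_inversions A k n (min_inversions A k n)

-- ===== LEMMAS AND PROOFS =====

-- `pairs`: reference inversion count, peeling the head
def pairs : List Int → Int
  | [] => 0
  | x :: xs => ((xs.countP (fun y => x > y) : Nat) : Int) + pairs xs

-- `minList`: reference minimum-with-infinity over a value list
def minList : List Int → Option Int
  | [] => none
  | x :: xs => oMin (some x) (minList xs)

-- `combsL`: all results of flipping exactly k elements of xs, in pyCombs order
def combsL (xs : List Int) (k : Nat) : List (List Int) :=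
  match k, xs with
  | 0, _ => [xs]
  | _+1, [] => []
  | k+1, x :: rest =>
      (combsL rest k).map (fun ys => (1 - x) :: ys) ++ (combsL rest (k+1)).map (fun ys => x :: ys)

theorem oMin_assoc (a b c : Option Int) : oMin (oMin a b) c = oMin a (oMin b c) := by
  cases a <;> cases b <;> cases c <;> simp [oMin, min_assoc]

theorem minList_append (l₁ l₂ : List Int) :
    minList (l₁ ++ l₂) = oMin (minList l₁) (minList l₂) := by
  induction l₁ with
  | nil =>
      simp only [List.nil_append, minList]
      cases h : minList l₂ <;> simp [oMin, h]
  | cons x xs ih => simp [minList, ih, oMin_assoc]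

theorem foldl_pyMinStep (l : List Int) (acc : Option Int) :
    l.foldl pyMinStep acc = oMin acc (minList l) := by
  induction l generalizing acc with
  | nil => cases acc <;> simp [minList, oMin]
  | cons x xs ih =>
      have : pyMinStep acc x = oMin acc (some x) := by cases acc <;> simp [pyMinStep, oMin]
      simp [List.foldl_cons, ih, this, minList, oMin_assoc]

-- ----- inversion-count lemmas -----

theorem filter_range_countP (xs : List Int) (p : Int → Bool) :
    ((List.range xs.length).filter (fun j => p (xs.getD j 0))).length = xs.countP p := by
  induction xs with
  | nil => simp
  | cons x t ih =>
      rw [List.length_cons, List.range_succ_eq_map, List.filter_cons]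
      have hmap : ((List.range t.length).map Nat.succ).filter (fun j => p ((x :: t).getD j 0))
          = ((List.range t.length).filter (fun j => p (t.getD j 0))).map Nat.succ := by
        rw [List.filter_map]; rfl
      rw [hmap, List.countP_cons]
      have ih' : (List.filter (fun j => p (t[j]?.getD 0)) (List.range t.length)).length
          = List.countP p t := ih
      by_cases hp : p x <;> simp [hp, List.getD_cons_zero, ih']

theorem count_inversions_cons (x : Int) (xs : List Int) :
    count_inversions (x :: xs) = ((xs.countP (fun y => x > y) : Nat) : Int) + count_inversions xs := by
  unfold count_inversions
  simp only [List.length_cons, List.range_succ_eq_map, List.map_cons, List.sum_cons, List.map_map]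
  have h0 : List.range' 1 (xs.length + 1 - 1) = (List.range xs.length).map Nat.succ := by
    rw [show xs.length + 1 - 1 = xs.length from rfl, List.range'_eq_map_range]
    exact List.map_congr_left (fun a _ => Nat.add_comm 1 a)
  have hfirst :
      (((List.range' (0+1) (xs.length + 1 - (0+1))).filter
          (fun j => (x :: xs).getD 0 0 > (x :: xs).getD j 0)).length : Int)
        = ((xs.countP (fun y => x > y) : Nat) : Int) := by
    rw [h0]
    have : ((List.range xs.length).map Nat.succ).filter
        (fun j => (x :: xs).getD 0 0 > (x :: xs).getD j 0)
        = ((List.range xs.length).filter (fun j => x > xs.getD j 0)).map Nat.succ := by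
      rw [List.filter_map]; rfl
    rw [this, List.length_map, filter_range_countP xs (fun y => x > y)]
  have hrest : ∀ i : Nat,
      (((List.range' (Nat.succ i + 1) (xs.length + 1 - (Nat.succ i + 1))).filter
          (fun j => (x :: xs).getD (Nat.succ i) 0 > (x :: xs).getD j 0)).length : Int)
        = (((List.range' (i+1) (xs.length - (i+1))).filter
          (fun j => xs.getD i 0 > xs.getD j 0)).length : Int) := by
    intro i
    have hr : List.range' (i + 1 + 1) (xs.length + 1 - (i + 1 + 1))
        = (List.range' (i+1) (xs.length - (i+1))).map Nat.succ := by
      rw [List.range'_eq_map_range, List.range'_eq_map_range, List.map_map]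
      have hl : xs.length + 1 - (i + 1 + 1) = xs.length - (i + 1) := by omega
      rw [hl]
      exact List.map_congr_left (fun a _ => by simp [Nat.succ_eq_add_one]; omega)
    rw [hr]
    have : ((List.range' (i+1) (xs.length - (i+1))).map Nat.succ).filter
        (fun j => (x :: xs).getD (Nat.succ i) 0 > (x :: xs).getD j 0)
        = ((List.range' (i+1) (xs.length - (i+1))).filter
            (fun j => xs.getD i 0 > xs.getD j 0)).map Nat.succ := by
      rw [List.filter_map]; rfl
    rw [this, List.length_map]
  rw [hfirst]
  congr 1
  exact congrArg List.sum (List.map_congr_left (fun i _ => hrest i))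

theorem count_inversions_eq_pairs (xs : List Int) : count_inversions xs = pairs xs := by
  induction xs with
  | nil => rfl
  | cons x t ih => rw [count_inversions_cons, pairs, ih]

theorem sum_ite_lt (x : Int) (zs : List Int) :
    (zs.map (fun i => if i < x then (1 : Int) else 0)).sum
      = ((zs.countP (fun y => y < x) : Nat) : Int) := by
  induction zs with
  | nil => simp
  | cons z zs ih =>
      by_cases h : z < x <;> simp [List.countP_cons, h, ih] <;> push_cast <;> ring

theorem sum_countP_append_singleton (seen : List Int) (x : Int) (xs : List Int) :
    (xs.map (fun z => (((seen ++ [x]).countP (fun y => y > z) : Nat) : Int))).sum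
      = (xs.map (fun z => ((seen.countP (fun y => y > z) : Nat) : Int))).sum
        + ((xs.countP (fun y => x > y) : Nat) : Int) := by
  induction xs with
  | nil => simp
  | cons z zs ih =>
      simp only [List.map_cons, List.sum_cons, List.countP_cons, ih, List.countP_append]
      by_cases h : x > z <;> simp [h, sum_ite_lt] <;> push_cast <;> ring

theorem invScan_eq (xs : List Int) : ∀ (seen : List Int) (t : Int),
    invScan seen t xs = t + ((xs.map (fun x => ((seen.countP (fun y => y > x) : Nat) : Int))).sum) + pairs xs := by
  induction xs with
  | nil => intro seen t; simp [invScan, pairs]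
  | cons x xs ih =>
      intro seen t
      rw [invScan, ih]
      simp only [List.map_cons, List.sum_cons, pairs]
      rw [sum_countP_append_singleton]
      have : ((seen.filter (fun y => y > x)).length : Int) = ((seen.countP (fun y => y > x) : Nat) : Int) := by
        rw [List.countP_eq_length_filter]
      rw [this]; ring

theorem inv_count_eq_pairs (xs : List Int) : inv_count xs = pairs xs := by
  rw [inv_count, invScan_eq]
  simp

-- ----- B's recursion computes the minimum over combsL -----

theorem combsL_of_gt : ∀ (xs : List Int) (k : Nat), xs.length < k + 1 → combsL xs (k + 1) = []
  | [], _, _ => rfl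
  | x :: rest, k, h => by
      cases k with
      | zero => simp at h
      | succ k =>
          rw [combsL, combsL_of_gt rest k (by simp at h; omega),
              combsL_of_gt rest (k+1) (by simp at h; omega)]
          rfl

theorem best_eq_minList (tail : List Int) : ∀ (xs : List Int) (k : Nat) (done : List Int),
    best tail done xs (k : Int)
      = minList ((combsL xs k).map (fun ys => inv_count (done ++ ys ++ tail))) := by
  intro xs
  induction xs with
  | nil =>
      intro k done
      cases k with
      | zero => simp [best, combsL, minList, oMin]
      | succ k =>
          rw [best, if_neg (show ¬((k + 1 : Nat) : Int) = 0 by push_cast; omega),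
              if_pos (show ((([] : List Int).length : Int) < ((k + 1 : Nat) : Int)) by push_cast; simp)]
          simp [combsL, minList]
  | cons x rest ih =>
      intro k done
      cases k with
      | zero => simp [best, combsL, minList, oMin]
      | succ k =>
          rw [best, if_neg (show ¬((k + 1 : Nat) : Int) = 0 by push_cast; omega)]
          by_cases hg : (((x :: rest).length : Int) < ((k + 1 : Nat) : Int))
          · rw [if_pos hg, combsL_of_gt (x :: rest) k (by exact_mod_cast hg)]
            rfl
          · rw [if_neg hg]
            have h1 : ((k + 1 : Nat) : Int) - 1 = ((k : Nat) : Int) := by push_cast; ring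
            rw [h1, ih k (done ++ [1 - x]), ih (k+1) (done ++ [x])]
            rw [combsL]
            rw [List.map_append, minList_append, List.map_map, List.map_map]
            congr 2 <;> · apply List.map_congr_left; intro ys _; simp

-- ----- index combinations over range(n) are combsL over the prefix -----

theorem flipAt_drop (B : List Int) (a : Nat) :
    (flipAt B (a : Int)).drop (a + 1) = B.drop (a + 1) := by
  simp [flipAt, List.drop_set]

theorem flipAt_take (B : List Int) (a : Nat) (ha : a < B.length) :
    (flipAt B (a : Int)).take (a + 1) = B.take a ++ [1 - B.getD a 0] := by
  have hset : B.set a (1 - B.getD a 0) = B.take a ++ (1 - B.getD a 0) :: B.drop (a+1) := by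
    rw [List.set_eq_take_append_cons_drop, if_pos ha]
  rw [flipAt, Int.toNat_natCast, hset, List.take_append, List.take_take, List.length_take]
  have h1 : min (a+1) a = a := by omega
  have h2 : a + 1 - min a B.length = 1 := by omega
  rw [h1, h2]
  simp

-- main index lemma, by induction on the remaining window length d = n' - a
theorem combs_window (n' : Nat) : ∀ (d : Nat) (B : List Int) (a : Nat) (k : Nat),
    a + d = n' → n' ≤ B.length →
    (pyCombs (PySem.List.pyRange (a : Int) (n' : Int) 1) (k+1)).map (fun c => flipAll B c)
      = (combsL ((B.drop a).take d) (k+1)).map (fun ys => B.take a ++ ys ++ B.drop n') := by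
  intro d
  induction d with
  | zero =>
      intro B a k ha hlen
      rw [PySem.List.pyRange_one_eq_nil (by omega)]
      simp [pyCombs, combsL]
  | succ d ih =>
      intro B a k ha hlen
      have han : (a : Int) < (n' : Int) := by push_cast; omega
      have halen : a < B.length := by omega
      have hfa : flipAt B (a : Int) = B.take a ++ (1 - B.getD a 0) :: B.drop (a+1) := by
        rw [flipAt, Int.toNat_natCast, List.set_eq_take_append_cons_drop, if_pos halen]
      have hwin : (B.drop a).take (d+1) = B.getD a 0 :: ((B.drop (a+1)).take d) := by
        have hd : B.drop a = B[a] :: B.drop (a+1) := List.drop_eq_getElem_cons halen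
        rw [hd, List.take_succ_cons, List.getD_eq_getElem B 0 halen]
      have htail : (B.drop (a+1)).take d ++ B.drop n' = B.drop (a+1) := by
        have h1 : B.drop n' = (B.drop (a+1)).drop d := by
          rw [List.drop_drop]; congr 1; omega
        rw [h1]; exact List.take_append_drop _ _
      rw [PySem.List.pyRange_one_cons han, pyCombs, List.map_append, List.map_map,
          hwin, combsL, List.map_append, List.map_map, List.map_map]
      congr 1
      · -- flip branch: index a is chosen; flipAll B (a :: c) = flipAll (flipAt B a) c
        cases k with
        | zero =>
            simp only [pyCombs, combsL, List.map_map, List.map_cons, List.map_nil,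
              Function.comp, flipAll, List.foldl_cons, List.foldl_nil]
            rw [hfa]
            simp [List.append_assoc, htail]
        | succ k =>
            have hlen' : n' ≤ (flipAt B (a : Int)).length := by
              simp [flipAt]; omega
            have hih := ih (flipAt B (a : Int)) (a+1) k (by omega) hlen'
            have hdropn : (flipAt B (a:Int)).drop n' = B.drop n' := by
              calc (flipAt B (a:Int)).drop n'
                  = ((flipAt B (a:Int)).drop (a+1)).drop (n'-(a+1)) := by
                    rw [List.drop_drop]; congr 1; omega
                _ = (B.drop (a+1)).drop (n'-(a+1)) := by rw [flipAt_drop]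
                _ = B.drop n' := by rw [List.drop_drop]; congr 1; omega
            calc (pyCombs (PySem.List.pyRange ((a:Int)+1) (n':Int) 1) (k+1)).map
                    ((fun c => flipAll B c) ∘ (fun c => (a : Int) :: c))
                = (pyCombs (PySem.List.pyRange ((a:Int)+1) (n':Int) 1) (k+1)).map
                    (fun c => flipAll (flipAt B (a : Int)) c) := by
                  apply List.map_congr_left; intro c _
                  simp [flipAll]
              _ = (combsL (((flipAt B (a:Int)).drop (a+1)).take d) (k+1)).map
                    (fun ys => (flipAt B (a:Int)).take (a+1) ++ ys ++ (flipAt B (a:Int)).drop n') := by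
                  have hcast : ((a : Int) + 1) = ((a + 1 : Nat) : Int) := by push_cast; ring
                  rw [hcast]; exact hih
              _ = (combsL ((B.drop (a+1)).take d) (k+1)).map
                    ((fun ys => B.take a ++ ys ++ B.drop n') ∘ (fun ys => (1 - B.getD a 0) :: ys)) := by
                  rw [flipAt_drop, flipAt_take B a halen, hdropn]
                  apply List.map_congr_left; intro ys _
                  simp
      · -- skip branch: index a not chosen
        have hih := ih B (a+1) k (by omega) hlen
        have hcast : ((a : Int) + 1) = ((a + 1 : Nat) : Int) := by push_cast; ring
        rw [hcast, hih]
        apply List.map_congr_left; intro ys _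
        have hta : B.take (a+1) = B.take a ++ [B.getD a 0] := by
          rw [List.take_succ]
          simp [List.getElem?_eq_getElem halen, List.getD_eq_getElem B 0 halen]
        simp [hta]

-- slices partition the list for every n (Python A[:n] ++ A[n:] == A)
theorem slice_partition (A : List Int) (n : Int) :
    PySem.List.slice A none (some n) ++ PySem.List.slice A (some n) none = A := by
  by_cases h : 0 ≤ n
  · rw [PySem.List.slice_to A h, PySem.List.slice_from A h]
    exact List.take_append_drop _ _
  · have hneg : n < 0 := by omega
    obtain ⟨m, hm⟩ : ∃ m : Nat, n = -((m+1 : Nat) : Int) := ⟨(-n).toNat - 1, by omega⟩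
    subst hm
    rw [PySem.List.slice_to_neg_natCast A (m+1) (by omega),
        PySem.List.slice_from_neg_natCast A (m+1) (by omega)]
    exact List.take_append_drop _ _

theorem best_zero (tail done todo : List Int) :
    best tail done todo 0 = some (inv_count (done ++ todo ++ tail)) := by
  cases todo <;> simp [best]

-- ===== VERDICT (by name: the statement is the Claim_ definition above) =====
theorem min_inversions_spec : Claim_equal_min_inversions := by
  intro A k n _hdom hpre
  obtain ⟨hk0, hpre⟩ := hpre
  unfold Spec_min_inversions min_inversions min_inversions_alt
  rw [← List.foldl_map, foldl_pyMinStep]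
  rcases hpre with hk | ⟨hkn, hnlen⟩
  · -- k = 0 : single empty combination on both sides
    subst hk
    rw [show (0:Int).toNat = 0 from rfl, best_zero]
    simp only [pyCombs, List.map_cons, List.map_nil, minList, oMin, List.nil_append]
    rw [slice_partition A n]
    simp [flipAll, count_inversions_eq_pairs, inv_count_eq_pairs]
  · rcases Nat.eq_zero_or_pos k.toNat with hz | hpos
    · -- k = 0 again (this branch also admits k = 0)
      have hk : k = 0 := by omega
      subst hk
      rw [show (0:Int).toNat = 0 from rfl, best_zero]
      simp only [pyCombs, List.map_cons, List.map_nil, minList, oMin, List.nil_append]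
      rw [slice_partition A n]
      simp [flipAll, count_inversions_eq_pairs, inv_count_eq_pairs]
    · -- 1 ≤ k ≤ n ≤ len A
      have hn0 : 0 ≤ n := le_trans hk0 hkn
      rw [PySem.List.slice_to A hn0, PySem.List.slice_from A hn0]
      obtain ⟨k', hk'⟩ : ∃ k', k.toNat = k' + 1 := ⟨k.toNat - 1, by omega⟩
      rw [hk']
      have hnlen' : n.toNat ≤ A.length := by omega
      have hcast : ((n.toNat : Int)) = n := by omega
      have hw := combs_window n.toNat n.toNat A 0 k' (by omega) hnlen'
      simp only [Nat.cast_zero, List.drop_zero, List.take_zero, List.nil_append] at hw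
      have hmap : (pyCombs (PySem.List.pyRange 0 (n.toNat : Int) 1) (k'+1)).map
            (fun comb => count_inversions (flipAll A comb))
          = (combsL (A.take n.toNat) (k'+1)).map
            (fun ys => inv_count ([] ++ ys ++ A.drop n.toNat)) := by
        have h1 : (pyCombs (PySem.List.pyRange 0 (n.toNat : Int) 1) (k'+1)).map
              (fun comb => count_inversions (flipAll A comb))
            = ((pyCombs (PySem.List.pyRange 0 (n.toNat : Int) 1) (k'+1)).map
                (fun c => flipAll A c)).map count_inversions := by
          rw [List.map_map]; rfl
        rw [h1, hw, List.map_map]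
        apply List.map_congr_left; intro ys _
        simp [count_inversions_eq_pairs, inv_count_eq_pairs]
      rw [hcast] at hmap
      have hbest := best_eq_minList (A.drop n.toNat) (A.take n.toNat) (k'+1) []
      have hkk : ((k' + 1 : Nat) : Int) = k := by omega
      rw [hkk] at hbest
      rw [hmap, ← hbest]
      cases hb : best (A.drop n.toNat) [] (A.take n.toNat) k <;> simp [oMin, hb]
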